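-- pv_equiv track=rewrite | github.com/Pavan30803/SequenceAnalyser | app.py | combine_axle_status
-- ===== SOURCE A (Python) =====
-- def combine_axle_status(colors):
--     color_set = {color for color in colors if color}
--     if not color_set:
--         return ''
--     if 'FF9900' in color_set:
--         return 'WIP'
--     if 'C0C0C0' in color_set:
--         return 'NOT STARTED'
--     if color_set == {'00FF00'}:
--         return 'AVAILABLE'
--     if color_set.issubset({'00FF00', 'FFFF00'}):
--         return 'IN TRANSIT'
--     return ''
-- ===== SOURCE B (Python) =====
-- # B: map each color to a numeric severity rank, reduce with max, index a label table.
-- _LABELS = ('', 'AVAILABLE', 'IN TRANSIT', '', 'NOT STARTED', 'WIP')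
--
-- def _rank(c):
--     if not c:
--         return 0
--     if c == 'FF9900':
--         return 5
--     if c == 'C0C0C0':
--         return 4
--     if c == 'FFFF00':
--         return 2
--     if c == '00FF00':
--         return 1
--     return 3
--
-- def combine_axle_status(colors):
--     return _LABELS[max(map(_rank, colors), default=0)]
-- ===== Notes on version B (the rewrite author's own statement) =====
-- stated objective: alternative
-- what changed: Replaces the set construction with membership/equality/subset tests and a priority cascade by mapping each color to a numeric severity rank, reducing with max, and indexing a fixed label table with the maximum rank.
import Mathlib
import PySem

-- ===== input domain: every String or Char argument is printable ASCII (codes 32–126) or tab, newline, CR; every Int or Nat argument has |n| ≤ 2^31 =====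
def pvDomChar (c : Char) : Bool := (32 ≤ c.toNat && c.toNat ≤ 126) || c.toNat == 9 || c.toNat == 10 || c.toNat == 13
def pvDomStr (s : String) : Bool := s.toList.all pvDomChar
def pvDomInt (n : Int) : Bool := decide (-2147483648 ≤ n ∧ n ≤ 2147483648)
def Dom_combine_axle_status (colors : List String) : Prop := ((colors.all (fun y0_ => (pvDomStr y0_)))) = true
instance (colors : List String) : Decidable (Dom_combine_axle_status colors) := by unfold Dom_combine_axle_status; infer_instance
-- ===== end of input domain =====

-- B replaces A's set-plus-priority-cascade by a map to numeric severity ranks reduced with max and a label-table lookup (alternative algorithm, same O(n) cost).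

-- ===== PORT A =====
def combine_axle_status (colors : List String) : String :=
  let color_set : PySem.Set String := PySem.Set.ofList (colors.filter (fun c => !(c == "")))
  if color_set.isEmpty then ""
  else if PySem.Set.contains color_set "FF9900" then "WIP"
  else if PySem.Set.contains color_set "C0C0C0" then "NOT STARTED"
  else if PySem.Set.equal color_set (PySem.Set.ofList ["00FF00"]) then "AVAILABLE"
  else if PySem.Set.issubset color_set (PySem.Set.ofList ["00FF00", "FFFF00"]) then "IN TRANSIT"
  else ""

-- ===== PORT B =====
def axleLabels : List String := ["", "AVAILABLE", "IN TRANSIT", "", "NOT STARTED", "WIP"]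

def axleRank (c : String) : Nat :=
  if c == "" then 0
  else if c == "FF9900" then 5
  else if c == "C0C0C0" then 4
  else if c == "FFFF00" then 2
  else if c == "00FF00" then 1
  else 3

def combine_axle_status_alt (colors : List String) : String :=
  -- _LABELS[max(map(_rank, colors), default=0)]; the index is provably ≤ 5 so getD never takes the default
  axleLabels.getD ((colors.map axleRank).foldl Nat.max 0) ""

-- ===== PRECONDITION & SPEC =====
def Spec_combine_axle_status (colors : List String) (out : String) : Prop := out = combine_axle_status_alt colors
instance (colors : List String) (out : String) : Decidable (Spec_combine_axle_status colors out) := by unfold Spec_combine_axle_status; infer_instance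

-- ===== CLAIM (what is proved, stated in full; the proofs are below) =====
def Claim_equal_combine_axle_status : Prop := ∀ (colors : List String), Dom_combine_axle_status colors → Spec_combine_axle_status colors (combine_axle_status colors)

-- ===== LEMMAS AND PROOFS =====

def anyTruthy (colors : List String) : Bool := colors.any (fun c => !(c == ""))
def hasCol (colors : List String) (col : String) : Bool := colors.any (fun c => c == col)
def hasOther (colors : List String) : Bool :=
  colors.any (fun c => !(c == "") && !(c == "FF9900") && !(c == "C0C0C0") && !(c == "00FF00") && !(c == "FFFF00"))

-- the boolean tower both ports are reduced to
def axleMaxRank (colors : List String) : Nat :=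
  if hasCol colors "FF9900" then 5
  else if hasCol colors "C0C0C0" then 4
  else if hasOther colors then 3
  else if hasCol colors "FFFF00" then 2
  else if hasCol colors "00FF00" then 1
  else 0

lemma foldl_max_init (l : List Nat) (a : Nat) :
    l.foldl Nat.max a = Nat.max a (l.foldl Nat.max 0) := by
  induction l generalizing a with
  | nil => simp
  | cons x xs ih =>
    simp only [List.foldl_cons]
    rw [ih (Nat.max a x), ih (Nat.max 0 x)]
    simp [Nat.max_assoc]

lemma hasCol_cons (c : String) (cs : List String) (col : String) :
    hasCol (c :: cs) col = ((c == col) || hasCol cs col) := by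
  simp [hasCol, List.any_cons]

lemma hasOther_cons (c : String) (cs : List String) :
    hasOther (c :: cs) =
      ((!(c == "") && !(c == "FF9900") && !(c == "C0C0C0") && !(c == "00FF00") && !(c == "FFFF00")) || hasOther cs) := by
  simp [hasOther, List.any_cons]

lemma foldl_rank (colors : List String) :
    (colors.map axleRank).foldl Nat.max 0 = axleMaxRank colors := by
  induction colors with
  | nil => simp [axleMaxRank, hasCol, hasOther]
  | cons c cs ih =>
    simp only [List.map_cons, List.foldl_cons]
    rw [foldl_max_init, ih]
    unfold axleMaxRank
    rw [hasCol_cons, hasCol_cons, hasCol_cons, hasCol_cons, hasOther_cons]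
    by_cases h0 : c = ""
    · subst h0
      rcases hF : hasCol cs "FF9900" <;> rcases hC : hasCol cs "C0C0C0" <;>
        rcases hO : hasOther cs <;> rcases hY : hasCol cs "FFFF00" <;>
        rcases hG : hasCol cs "00FF00" <;> simp [axleRank]
    · have e0 : (c == "") = false := beq_eq_false_iff_ne.mpr h0
      by_cases h1 : c = "FF9900"
      · subst h1
        rcases hF : hasCol cs "FF9900" <;> rcases hC : hasCol cs "C0C0C0" <;>
          rcases hO : hasOther cs <;> rcases hY : hasCol cs "FFFF00" <;>
          rcases hG : hasCol cs "00FF00" <;> simp [axleRank]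
      · have e1 : (c == "FF9900") = false := beq_eq_false_iff_ne.mpr h1
        by_cases h2 : c = "C0C0C0"
        · subst h2
          rcases hF : hasCol cs "FF9900" <;> rcases hC : hasCol cs "C0C0C0" <;>
            rcases hO : hasOther cs <;> rcases hY : hasCol cs "FFFF00" <;>
            rcases hG : hasCol cs "00FF00" <;> simp [axleRank]
        · have e2 : (c == "C0C0C0") = false := beq_eq_false_iff_ne.mpr h2
          by_cases h3 : c = "FFFF00"
          · subst h3
            rcases hF : hasCol cs "FF9900" <;> rcases hC : hasCol cs "C0C0C0" <;>
              rcases hO : hasOther cs <;> rcases hY : hasCol cs "FFFF00" <;>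
              rcases hG : hasCol cs "00FF00" <;> simp [axleRank]
          · have e3 : (c == "FFFF00") = false := beq_eq_false_iff_ne.mpr h3
            by_cases h4 : c = "00FF00"
            · subst h4
              rcases hF : hasCol cs "FF9900" <;> rcases hC : hasCol cs "C0C0C0" <;>
                rcases hO : hasOther cs <;> rcases hY : hasCol cs "FFFF00" <;>
                rcases hG : hasCol cs "00FF00" <;> simp [axleRank]
            · have e4 : (c == "00FF00") = false := beq_eq_false_iff_ne.mpr h4
              simp only [e0, e1, e2, e3, e4, Bool.false_or, Bool.not_false, Bool.true_and]
              rcases hF : hasCol cs "FF9900" <;> rcases hC : hasCol cs "C0C0C0" <;>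
                rcases hO : hasOther cs <;> rcases hY : hasCol cs "FFFF00" <;>
                rcases hG : hasCol cs "00FF00" <;> simp [axleRank, e0, e1, e2, e3, e4]

lemma mem_truthy_set (colors : List String) (x : String) :
    x ∈ PySem.Set.ofList (colors.filter (fun c => !(c == ""))) ↔ x ∈ colors ∧ x ≠ "" := by
  simp [PySem.Set.mem_ofList, List.mem_filter]

lemma hasCol_iff (colors : List String) (col : String) :
    hasCol colors col = true ↔ col ∈ colors := by
  simp [hasCol]

lemma anyTruthy_iff (colors : List String) :
    anyTruthy colors = true ↔ ∃ c ∈ colors, c ≠ "" := by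
  simp [anyTruthy]

lemma hasOther_iff (colors : List String) :
    hasOther colors = true ↔
      ∃ c ∈ colors, c ≠ "" ∧ c ≠ "FF9900" ∧ c ≠ "C0C0C0" ∧ c ≠ "00FF00" ∧ c ≠ "FFFF00" := by
  simp [hasOther, and_assoc]

-- A reduced to the same boolean data
lemma A_char (colors : List String) :
    combine_axle_status colors =
      (if anyTruthy colors = false then ""
       else if hasCol colors "FF9900" then "WIP"
       else if hasCol colors "C0C0C0" then "NOT STARTED"
       else if hasCol colors "00FF00" && !hasCol colors "FFFF00" && !hasOther colors then "AVAILABLE"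
       else if !hasOther colors then "IN TRANSIT"
       else "") := by
  unfold combine_axle_status
  set s := PySem.Set.ofList (colors.filter (fun c => !(c == ""))) with hs
  have hmem := mem_truthy_set colors
  rw [← hs] at hmem
  have hempty : s.isEmpty = !(anyTruthy colors) := by
    rcases h : anyTruthy colors with _ | _
    · simp only [Bool.not_false, List.isEmpty_iff]
      rw [List.eq_nil_iff_forall_not_mem]
      intro x hx
      rw [hmem] at hx
      have hno : ¬ ∃ c ∈ colors, c ≠ "" :=
        fun hex => by simp [(anyTruthy_iff colors).mpr hex] at h
      exact hno ⟨x, hx.1, hx.2⟩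
    · simp only [Bool.not_true, List.isEmpty_eq_false_iff, ← List.length_pos_iff_ne_nil] at *
      obtain ⟨c, hc, hne⟩ := (anyTruthy_iff colors).mp h
      have : c ∈ s := (hmem c).mpr ⟨hc, hne⟩
      exact List.length_pos_of_mem this
  have hcontains : ∀ col : String, col ≠ "" →
      PySem.Set.contains s col = hasCol colors col := by
    intro col hcol
    rcases h : hasCol colors col with _ | _
    · rw [Bool.eq_false_iff]
      intro hc
      rw [PySem.Set.contains_iff] at hc
      have hno : col ∉ colors :=
        fun hm => by simp [(hasCol_iff colors col).mpr hm] at h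
      exact hno ((hmem col).mp hc).1
    · rw [PySem.Set.contains_iff, hmem]
      exact ⟨(hasCol_iff colors col).mp h, hcol⟩
  simp only [hempty, hcontains "FF9900" (by decide), hcontains "C0C0C0" (by decide)]
  by_cases ha : anyTruthy colors = true
  · simp only [ha, Bool.not_true, Bool.false_eq_true, if_false]
    by_cases hf : hasCol colors "FF9900" = true
    · simp [hf]
    · rw [Bool.not_eq_true] at hf
      simp only [hf, Bool.false_eq_true, if_false]
      by_cases hk : hasCol colors "C0C0C0" = true
      · simp [hk]
      · rw [Bool.not_eq_true] at hk
        simp only [hk, Bool.false_eq_true, if_false]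
        have hfm : "FF9900" ∉ colors := fun h => by simp [hasCol_iff colors "FF9900" |>.mpr h] at hf
        have hkm : "C0C0C0" ∉ colors := fun h => by simp [hasCol_iff colors "C0C0C0" |>.mpr h] at hk
        have heq : PySem.Set.equal s (PySem.Set.ofList ["00FF00"]) =
            (hasCol colors "00FF00" && !hasCol colors "FFFF00" && !hasOther colors) := by
          rcases hrhs : (hasCol colors "00FF00" && !hasCol colors "FFFF00" && !hasOther colors) with _ | _
          · rw [Bool.eq_false_iff]
            intro hc
            rw [PySem.Set.equal_iff] at hc
            have hmem1 : ∀ x, (x ∈ colors ∧ x ≠ "") ↔ x = "00FF00" := by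
              intro x
              rw [← hmem x, hc x]
              simp [PySem.Set.mem_ofList]
            have hg : hasCol colors "00FF00" = true := by
              rw [hasCol_iff]
              exact ((hmem1 "00FF00").mpr rfl).1
            have hy : hasCol colors "FFFF00" = false := by
              rw [Bool.eq_false_iff]
              intro hy
              have := (hmem1 "FFFF00").mp ⟨(hasCol_iff colors "FFFF00").mp hy, by decide⟩
              exact absurd this (by decide)
            have ho : hasOther colors = false := by
              rw [Bool.eq_false_iff]
              intro ho
              obtain ⟨c, hc1, hc2, _, _, hc5, _⟩ := (hasOther_iff colors).mp ho
              exact hc5 ((hmem1 c).mp ⟨hc1, hc2⟩)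
            simp [hg, hy, ho] at hrhs
          · simp only [Bool.and_eq_true, Bool.not_eq_eq_eq_not, Bool.not_true] at hrhs
            obtain ⟨⟨hg, hy⟩, ho⟩ := hrhs
            rw [PySem.Set.equal_iff]
            intro x
            rw [hmem x]
            simp only [PySem.Set.mem_ofList, List.mem_singleton]
            constructor
            · rintro ⟨hx, hne⟩
              by_contra hxg
              rcases eq_or_ne x "FFFF00" with h | h
              · subst h; simp [hasCol_iff colors "FFFF00" |>.mpr hx] at hy
              · rcases eq_or_ne x "FF9900" with h1 | h1
                · exact hfm (h1 ▸ hx)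
                · rcases eq_or_ne x "C0C0C0" with h2 | h2
                  · exact hkm (h2 ▸ hx)
                  · have : hasOther colors = true :=
                      (hasOther_iff colors).mpr ⟨x, hx, hne, h1, h2, hxg, h⟩
                    simp [this] at ho
            · rintro rfl
              exact ⟨(hasCol_iff colors "00FF00").mp hg, by decide⟩
        have hsub : PySem.Set.issubset s (PySem.Set.ofList ["00FF00", "FFFF00"]) =
            !hasOther colors := by
          rcases ho : hasOther colors with _ | _
          · simp only [Bool.not_false]
            rw [PySem.Set.issubset_iff]
            intro x hx
            rw [hmem x] at hx
            simp only [PySem.Set.mem_ofList, List.mem_cons]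
            by_contra hxm
            simp only [not_or] at hxm
            rcases eq_or_ne x "FF9900" with h1 | h1
            · exact hfm (h1 ▸ hx.1)
            · rcases eq_or_ne x "C0C0C0" with h2 | h2
              · exact hkm (h2 ▸ hx.1)
              · have : hasOther colors = true :=
                  (hasOther_iff colors).mpr ⟨x, hx.1, hx.2, h1, h2, hxm.1, hxm.2.1⟩
                simp [this] at ho
          · simp only [Bool.not_true, Bool.eq_false_iff]
            intro hc
            rw [PySem.Set.issubset_iff] at hc
            obtain ⟨c, hc1, hc2, _, _, hc5, hc6⟩ := (hasOther_iff colors).mp ho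
            have := hc c ((hmem c).mpr ⟨hc1, hc2⟩)
            simp only [PySem.Set.mem_ofList, List.mem_cons] at this
            rcases this with h | h | h
            · exact hc5 h
            · exact hc6 h
            · exact absurd h (List.not_mem_nil)
        simp [heq, hsub]
  · rw [Bool.not_eq_true] at ha
    simp [ha]

-- anyTruthy is the disjunction of the five category flags
lemma anyTruthy_eq (colors : List String) :
    anyTruthy colors =
      (hasCol colors "FF9900" || hasCol colors "C0C0C0" || hasOther colors ||
       hasCol colors "FFFF00" || hasCol colors "00FF00") := by
  induction colors with
  | nil => simp [anyTruthy, hasCol, hasOther]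
  | cons c cs ih =>
    simp only [anyTruthy, hasCol, hasOther, List.any_cons] at *
    rw [ih]
    by_cases h0 : c = ""
    · simp [h0]
    · have e0 : (c == "") = false := beq_eq_false_iff_ne.mpr h0
      simp only [e0, Bool.not_false, Bool.true_or]
      rcases hb1 : (c == "FF9900") <;> rcases hb2 : (c == "C0C0C0") <;>
        rcases hb3 : (c == "00FF00") <;> rcases hb4 : (c == "FFFF00") <;> simp

theorem combine_axle_status_spec : Claim_equal_combine_axle_status := by
  intro colors _
  unfold Spec_combine_axle_status combine_axle_status_alt
  rw [foldl_rank, A_char, anyTruthy_eq]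
  unfold axleMaxRank
  rcases hf : hasCol colors "FF9900" <;> rcases hk : hasCol colors "C0C0C0" <;>
    rcases ho : hasOther colors <;> rcases hy : hasCol colors "FFFF00" <;>
    rcases hg : hasCol colors "00FF00" <;> simp [axleLabels]

-- ===== VERDICT (by name: the statement is the Claim_ definition above) =====
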